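-- pv_equiv track=rewrite | github.com/sumitk87549/Train_POC | fine_tune_model.py | segregate_sections
-- ===== SOURCE A (Python) =====
-- def segregate_sections(text: str) -> str:
--     """Return properly segregated sections."""
--     sections = []
--     lines = text.split('\n')
--     current_section = None
--
--     for line in lines:
--         if line.startswith('***'):
--             current_section = line
--             sections.append(line)
--         elif current_section and line.strip():
--             sections.append(line)
--
--     return '\n'.join(sections) if sections else ""
-- ===== SOURCE B (Python) =====
-- def segregate_sections(text: str) -> str:
--     """Return properly segregated sections."""
--     lines = text.split('\n')
--     for i, line in enumerate(lines):
--         if line.startswith('***'):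
--             return '\n'.join(l for l in lines[i:]
--                              if l.startswith('***') or l.strip())
--     return ""
-- ===== Notes on version B (the rewrite author's own statement) =====
-- stated objective: simpler
-- what changed: B first locates the index of the first header line, then keeps the tail's headers and non-blank lines with one stateless filter, removing A's mutable current_section state; same O(n) cost.
import Mathlib
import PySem

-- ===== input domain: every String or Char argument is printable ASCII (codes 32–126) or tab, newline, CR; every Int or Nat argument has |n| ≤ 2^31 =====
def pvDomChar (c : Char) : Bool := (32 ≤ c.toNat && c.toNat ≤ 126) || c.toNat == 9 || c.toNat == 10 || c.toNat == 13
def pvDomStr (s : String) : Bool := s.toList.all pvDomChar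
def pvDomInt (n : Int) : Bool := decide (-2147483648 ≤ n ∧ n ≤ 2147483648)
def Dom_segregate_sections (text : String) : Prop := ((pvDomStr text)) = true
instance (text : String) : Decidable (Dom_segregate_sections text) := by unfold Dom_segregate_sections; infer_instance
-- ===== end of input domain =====

-- B replaces A's mutable current_section state by first locating the first '***' header,
-- then one stateless filter over the tail; same result, same O(n) cost (objective: simpler).

-- line.startswith('***'), shared spelling of the test both Pythons write
def segHeader (l : String) : Bool := PySem.Str.startswith l "***"

-- ===== PORT A =====
-- loop body of A's for-loop: state = (sections, current_section); Python truthiness of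
-- current_section (None and "" falsy) is encoded as st.2.getD "" ≠ ""
def segStepA (st : List String × Option String) (line : String) : List String × Option String :=
  if segHeader line then (st.1 ++ [line], some line)
  else if decide (st.2.getD "" ≠ "") && decide (PySem.Str.strip line ≠ "") then
    (st.1 ++ [line], st.2)
  else st

def segregate_sections (text : String) : String :=
  let lines := (PySem.Str.split? text "\n").getD []   -- sep ≠ "", so split? is always some
  let st := lines.foldl segStepA ([], none)
  if st.1 ≠ [] then PySem.Str.join "\n" st.1 else ""

-- ===== PORT B =====
-- keep predicate of B's filter: l.startswith('***') or l.strip()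
def segKeepB (l : String) : Bool := segHeader l || decide (PySem.Str.strip l ≠ "")

def segregate_sections_alt (text : String) : String :=
  let lines := (PySem.Str.split? text "\n").getD []   -- sep ≠ "", so split? is always some
  match lines.findIdx? segHeader with
  | none => ""
  | some i => PySem.Str.join "\n" ((lines.drop i).filter segKeepB)

-- ===== PRECONDITION & SPEC =====
def Spec_segregate_sections (text : String) (out : String) : Prop := out = segregate_sections_alt text
instance (text : String) (out : String) : Decidable (Spec_segregate_sections text out) := by unfold Spec_segregate_sections; infer_instance

-- ===== CLAIM (what is proved, stated in full; the proofs are below) =====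
def Claim_equal_segregate_sections : Prop := ∀ (text : String), Dom_segregate_sections text → Spec_segregate_sections text (segregate_sections text)

-- ===== LEMMAS AND PROOFS =====

-- a line starting with "***" is nonempty
theorem header_ne_empty (l : String) (h : segHeader l = true) : l ≠ "" := by
  have hpre := (PySem.Chars.startswith_iff l.toList "***".toList).mp
    (by simpa [segHeader] using h)
  have hlen : 3 ≤ l.toList.length := by simpa using hpre.length_le
  intro he
  subst he
  simp at hlen

-- once current_section is a truthy string, A's loop appends exactly the segKeepB-lines
theorem foldl_after_header (ls : List String) (acc : List String) (cur : Option String)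
    (hcur : cur.getD "" ≠ "") :
    (ls.foldl segStepA (acc, cur)).1 = acc ++ ls.filter segKeepB := by
  induction ls generalizing acc cur with
  | nil => simp
  | cons l ls ih =>
    simp only [List.foldl_cons, List.filter_cons]
    by_cases hp : segHeader l = true
    · rw [show segStepA (acc, cur) l = (acc ++ [l], some l) by simp [segStepA, hp]]
      rw [ih (acc ++ [l]) (some l) (by simpa using header_ne_empty l hp)]
      simp [segKeepB, hp]
    · by_cases hs : PySem.Str.strip l ≠ ""
      · rw [show segStepA (acc, cur) l = (acc ++ [l], cur) by
          simp [segStepA, hp, hcur, hs]]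
        rw [ih (acc ++ [l]) cur hcur]
        simp [segKeepB, hp, hs]
      · rw [show segStepA (acc, cur) l = (acc, cur) by simp [segStepA, hp, hs]]
        rw [ih acc cur hcur]
        simp [segKeepB, hp, hs]

-- the agreement, stated on the line list
theorem core (ls : List String) :
    (if (ls.foldl segStepA ([], none)).1 ≠ [] then
        PySem.Str.join "\n" (ls.foldl segStepA ([], none)).1 else "") =
    (match ls.findIdx? segHeader with
     | none => ""
     | some i => PySem.Str.join "\n" ((ls.drop i).filter segKeepB)) := by
  induction ls with
  | nil => simp
  | cons l ls ih =>
    by_cases hp : segHeader l = true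
    · have h1 : ((l :: ls).foldl segStepA ([], none)).1 = [l] ++ ls.filter segKeepB := by
        simp only [List.foldl_cons]
        rw [show segStepA ([], none) l = ([l], some l) by simp [segStepA, hp]]
        exact foldl_after_header ls [l] (some l) (by simpa using header_ne_empty l hp)
      rw [h1]
      simp [List.findIdx?_cons, hp, segKeepB]
    · have h0 : segStepA ([], none) l = ([], none) := by
        simp [segStepA, hp]
      simp only [List.foldl_cons, h0, List.findIdx?_cons, hp, Bool.false_eq_true, if_false]
      rw [ih]
      cases hfi : ls.findIdx? segHeader with
      | none => simp
      | some i => simp [List.drop_succ_cons]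

-- ===== VERDICT (by name: the statement is the Claim_ definition above) =====
theorem segregate_sections_spec : Claim_equal_segregate_sections := by
  intro text _
  unfold Spec_segregate_sections segregate_sections segregate_sections_alt
  exact core ((PySem.Str.split? text "\n").getD [])
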